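-- pv_equiv track=rewrite | github.com/eunsaocho/eunsao | homework4/homework4.py | reverse_and_stride
-- ===== SOURCE A (Python) =====
-- def reverse_and_stride(lst):
--     i = 0
--     helper = []
--     returnList = []
--     while i < len(lst):
--         helper.insert(0, lst[i])
--         i += 1
--     i=0
--     while i < len(lst):
--         returnList.append(helper[i])
--         i+=3
--     return returnList
-- ===== SOURCE B (Python) =====
-- def reverse_and_stride(lst):
--     out = []
--     j = len(lst) - 1
--     while j >= 0:
--         out.append(lst[j])
--         j -= 3
--     return out
-- ===== Notes on version B (the rewrite author's own statement) =====
-- stated objective: simpler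
-- what changed: B never builds the reversed copy: a single backward pass over the original list from index len-1 with step -3 replaces A's two loops (quadratic insert(0,...) reversal then a stride scan).
import Mathlib
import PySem

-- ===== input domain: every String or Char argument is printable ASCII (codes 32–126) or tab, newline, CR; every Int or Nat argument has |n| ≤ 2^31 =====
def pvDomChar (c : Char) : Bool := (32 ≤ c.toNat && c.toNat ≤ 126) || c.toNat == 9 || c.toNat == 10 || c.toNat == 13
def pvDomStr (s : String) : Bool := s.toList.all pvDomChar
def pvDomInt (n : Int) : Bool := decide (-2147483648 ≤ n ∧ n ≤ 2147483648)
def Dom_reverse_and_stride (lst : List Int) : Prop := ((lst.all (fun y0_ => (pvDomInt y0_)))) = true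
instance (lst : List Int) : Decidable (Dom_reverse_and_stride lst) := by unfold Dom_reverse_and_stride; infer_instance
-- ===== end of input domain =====

-- B replaces A's two loops (insert-at-front reversal, then a stride scan) by one
-- backward pass over the original list from index len-1 with step -3 (objective: simpler).

-- ===== PORT A =====
-- first while loop: helper.insert(0, lst[i]) for i = 0,1,…
def pvRevLoop (lst helper : List Int) : List Int :=
  match lst with
  | [] => helper
  | x :: xs => pvRevLoop xs (x :: helper)

-- second while loop: i from 0 by 3 while i < len(lst); helper[i] (always in range)
def pvStrideLoop (helper : List Int) (i : Nat) : List Int :=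
  if h : i < helper.length then helper[i] :: pvStrideLoop helper (i + 3) else []
termination_by helper.length - i

def reverse_and_stride (lst : List Int) : List Int :=
  pvStrideLoop (pvRevLoop lst []) 0

-- ===== PORT B =====
-- while j >= 0: out.append(lst[j]); j -= 3   (j starts at len-1; lst[j] with 0 ≤ j < len)
def pvBackLoop (lst : List Int) (j : Int) : List Int :=
  if h : 0 ≤ j then lst.getD j.toNat 0 :: pvBackLoop lst (j - 3) else []
termination_by (j + 1).toNat
decreasing_by omega

def reverse_and_stride_alt (lst : List Int) : List Int :=
  pvBackLoop lst ((lst.length : Int) - 1)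

-- ===== PRECONDITION & SPEC =====
def Spec_reverse_and_stride (lst : List Int) (out : List Int) : Prop := out = reverse_and_stride_alt lst
instance (lst : List Int) (out : List Int) : Decidable (Spec_reverse_and_stride lst out) := by unfold Spec_reverse_and_stride; infer_instance

-- ===== CLAIM (what is proved, stated in full; the proofs are below) =====
def Claim_equal_reverse_and_stride : Prop := ∀ (lst : List Int), Dom_reverse_and_stride lst → Spec_reverse_and_stride lst (reverse_and_stride lst)

-- ===== LEMMAS AND PROOFS =====
theorem pvRevLoop_eq (lst acc : List Int) : pvRevLoop lst acc = lst.reverse ++ acc := by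
  induction lst generalizing acc with
  | nil => simp [pvRevLoop]
  | cons x xs ih => simp [pvRevLoop, ih]

theorem stride_eq_back (lst : List Int) (i : Nat) :
    pvStrideLoop lst.reverse i = pvBackLoop lst ((lst.length : Int) - 1 - i) := by
  rw [pvStrideLoop, pvBackLoop]
  by_cases h : i < lst.length
  · have h0 : (0:Int) ≤ (lst.length : Int) - 1 - i := by omega
    have hlen : i < lst.reverse.length := by simpa using h
    simp only [dif_pos hlen, dif_pos h0]
    have hidx : ((lst.length : Int) - 1 - i).toNat = lst.length - 1 - i := by omega
    have hget : lst.reverse[i]'hlen = lst.getD (lst.length - 1 - i) 0 := by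
      rw [List.getElem_reverse]
      rw [List.getD_eq_getElem _ _ (by omega)]
    rw [hidx, hget]
    have hrec : (lst.length : Int) - 1 - i - 3 = (lst.length : Int) - 1 - (↑(i + 3) : Int) := by
      push_cast; ring
    rw [stride_eq_back lst (i + 3), hrec]
  · simp [h]
termination_by lst.length - i

-- ===== VERDICT (by name: the statement is the Claim_ definition above) =====
theorem reverse_and_stride_spec : Claim_equal_reverse_and_stride := by
  intro lst _
  unfold Spec_reverse_and_stride reverse_and_stride reverse_and_stride_alt
  rw [pvRevLoop_eq, List.append_nil]
  simpa using stride_eq_back lst 0
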